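-- pv_equiv track=rewrite | github.com/yabincui/topcoder | Pronunciation.py | canPronounce
-- ===== SOURCE A (Python) =====
-- def canPronounce(words):
-- 	for word in words:
-- 		can = True
-- 		state = 0
-- 		for x in word:
-- 			if x.lower() in 'aeiou':
-- 				if state <= 0:
-- 					state = 1
-- 					last_x = x.lower()
-- 				elif last_x == x.lower():
-- 					pass
-- 				else:
-- 					can = False
-- 					break
-- 			else:
-- 				if state >= 0:
-- 					state = -1
-- 				elif state == -1:
-- 					state = -2
-- 				else:
-- 					can = False
-- 					break
-- 		if not can:
-- 			return word
-- 	return ''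
-- ===== SOURCE B (Python) =====
-- def canPronounce(words):
--     vowels = set('aeiou')
--
--     def bad(word):
--         w = word.lower()
--         if any(a in vowels and b in vowels and a != b for a, b in zip(w, w[1:])):
--             return True
--         return any(a not in vowels and b not in vowels and c not in vowels
--                    for a, b, c in zip(w, w[1:], w[2:]))
--
--     return next((word for word in words if bad(word)), '')
-- ===== Notes on version B (the rewrite author's own statement) =====
-- stated objective: simpler
-- what changed: Replaces A's explicit vowel/consonant run state machine (state/last_x with break) by stateless window checks on the lowercased word: any adjacent pair of differing vowels or any 3-window of consonants, with next() over a generator picking the first bad word.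
import Mathlib
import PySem

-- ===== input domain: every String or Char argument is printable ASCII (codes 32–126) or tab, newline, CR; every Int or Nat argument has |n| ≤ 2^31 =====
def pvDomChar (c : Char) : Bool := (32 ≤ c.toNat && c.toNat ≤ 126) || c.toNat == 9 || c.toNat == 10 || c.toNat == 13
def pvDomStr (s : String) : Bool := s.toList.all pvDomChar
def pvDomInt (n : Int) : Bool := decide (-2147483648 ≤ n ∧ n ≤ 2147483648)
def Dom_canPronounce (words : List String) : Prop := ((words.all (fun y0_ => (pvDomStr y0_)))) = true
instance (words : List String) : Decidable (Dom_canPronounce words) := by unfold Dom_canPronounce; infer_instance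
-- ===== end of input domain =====

-- B replaces A's explicit vowel/consonant run state machine by stateless window checks
-- (any adjacent pair of differing vowels, any 3-window of consonants) over the lowercased
-- word; objective: simpler, same cost.

-- ===== PORT A =====
-- x.lower() in 'aeiou' for a single char x = membership of the lowered char (exact: sub has length 1)
def pvAVowel (x : Char) : Bool := PySem.Chars.lowerChar x ∈ ['a', 'e', 'i', 'o', 'u']

-- A's inner `for x in word` loop; `can`/`break` become the Bool result, state/last_x the loop state.
-- last_x is only ever read after it was assigned (state = 1); the initial ' ' is the unbound slot.
def pvALoop : List Char → Int → Char → Bool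
  | [], _, _ => true
  | x :: rest, state, lastx =>
    if pvAVowel x then
      if state ≤ 0 then pvALoop rest 1 (PySem.Chars.lowerChar x)
      else if lastx == PySem.Chars.lowerChar x then pvALoop rest state lastx
      else false
    else
      if state ≥ 0 then pvALoop rest (-1) lastx
      else if state == -1 then pvALoop rest (-2) lastx
      else false

-- A's outer loop: return the first word whose inner loop left can = False
def canPronounce : List String → String
  | [] => ""
  | w :: ws => if pvALoop w.toList 0 ' ' = false then w else canPronounce ws

-- ===== PORT B =====
def pvBVowel (c : Char) : Bool := c ∈ ['a', 'e', 'i', 'o', 'u']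

-- Source B's bad(word): w[1:] / w[2:] ported as drop 1 / drop 2 (exact for these slices);
-- zip(w, w[1:], w[2:]) as nested pair zips.
def pvBBad (word : String) : Bool :=
  let w := (PySem.Str.lower word).toList
  if (w.zip (w.drop 1)).any (fun p => pvBVowel p.1 && pvBVowel p.2 && p.1 != p.2) then true
  else (w.zip ((w.drop 1).zip (w.drop 2))).any
        (fun p => !pvBVowel p.1 && !pvBVowel p.2.1 && !pvBVowel p.2.2)

-- next((word for word in words if bad(word)), '')
def canPronounce_alt (words : List String) : String :=
  (words.find? pvBBad).getD ""

-- ===== PRECONDITION & SPEC =====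
def Spec_canPronounce (words : List String) (out : String) : Prop := out = canPronounce_alt words
instance (words : List String) (out : String) : Decidable (Spec_canPronounce words out) := by unfold Spec_canPronounce; infer_instance

-- ===== CLAIM (what is proved, stated in full; the proofs are below) =====
def Claim_equal_canPronounce : Prop := ∀ (words : List String), Dom_canPronounce words → Spec_canPronounce words (canPronounce words)

-- ===== LEMMAS AND PROOFS =====

-- the two window checks of pvBBad, as standalone predicates
def pairBad (l : List Char) : Bool :=
  (l.zip (l.drop 1)).any (fun p => pvBVowel p.1 && pvBVowel p.2 && p.1 != p.2)
def tripleBad (l : List Char) : Bool :=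
  (l.zip ((l.drop 1).zip (l.drop 2))).any
    (fun p => !pvBVowel p.1 && !pvBVowel p.2.1 && !pvBVowel p.2.2)

-- head-context predicates used to state the state-machine invariant
def headCons : List Char → Bool
  | [] => false
  | a :: _ => !pvBVowel a
def twoCons : List Char → Bool
  | a :: b :: _ => !pvBVowel a && !pvBVowel b
  | _ => false
def pairHead (a : Char) : List Char → Bool
  | b :: _ => pvBVowel a && pvBVowel b && a != b
  | [] => false

lemma pairBad_cons (a : Char) (l : List Char) :
    pairBad (a :: l) = (pairHead a l || pairBad l) := by
  cases l <;> simp [pairBad, pairHead]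

lemma tripleBad_cons (a : Char) (l : List Char) :
    tripleBad (a :: l) = ((!pvBVowel a && twoCons l) || tripleBad l) := by
  match l with
  | [] => simp [tripleBad, twoCons]
  | [b] => simp [tripleBad, twoCons]
  | b :: c :: r => simp [tripleBad, twoCons, Bool.and_assoc]

lemma pairHead_of_vowel_ne {a b : Char} (l : List Char) (ha : pvBVowel a = true)
    (hb : pvBVowel b = true) (hne : a ≠ b) : pairHead a (b :: l) = true := by
  simp [pairHead, ha, hb, hne]

lemma pairHead_false_left {a : Char} (l : List Char) (ha : pvBVowel a = false) :
    pairHead a l = false := by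
  cases l <;> simp [pairHead, ha]

lemma pairHead_false_right {a b : Char} (l : List Char) (hb : pvBVowel b = false) :
    pairHead a (b :: l) = false := by
  simp [pairHead, hb]

lemma twoCons_cons (a : Char) (l : List Char) :
    twoCons (a :: l) = (!pvBVowel a && headCons l) := by
  cases l <;> simp [twoCons, headCons]

lemma twoCons_of_headCons_false {l : List Char} (h : headCons l = false) :
    twoCons l = false := by
  match l with
  | [] => rfl
  | [a] => rfl
  | a :: b :: r => simp_all [headCons, twoCons]

-- the invariant: pvALoop in each reachable state equals the window checks on the rest of
-- the (lowercased) word, extended by what the state remembers about the characters read.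
lemma pvALoop_char (cs : List Char) :
    (∀ d, pvALoop cs 0 d = !(pairBad (cs.map PySem.Chars.lowerChar)
        || tripleBad (cs.map PySem.Chars.lowerChar))) ∧
    (∀ v, pvBVowel v = true → pvALoop cs 1 v
        = !(pairBad (v :: cs.map PySem.Chars.lowerChar)
        || tripleBad (v :: cs.map PySem.Chars.lowerChar))) ∧
    (∀ d, pvALoop cs (-1) d = !(pairBad (cs.map PySem.Chars.lowerChar)
        || tripleBad (cs.map PySem.Chars.lowerChar)
        || twoCons (cs.map PySem.Chars.lowerChar))) ∧
    (∀ d, pvALoop cs (-2) d = !(pairBad (cs.map PySem.Chars.lowerChar)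
        || tripleBad (cs.map PySem.Chars.lowerChar)
        || headCons (cs.map PySem.Chars.lowerChar))) := by
  induction cs with
  | nil => simp [pvALoop, pairBad, tripleBad, twoCons, headCons]
  | cons x rest ih =>
    obtain ⟨ih0, ih1, ihm1, ihm2⟩ := ih
    have hAV : pvAVowel x = pvBVowel (PySem.Chars.lowerChar x) := by
      simp [pvAVowel, pvBVowel]
    cases hv : pvBVowel (PySem.Chars.lowerChar x) with
    | true =>
      refine ⟨?_, ?_, ?_, ?_⟩
      · intro d
        rw [show pvALoop (x :: rest) 0 d = pvALoop rest 1 (PySem.Chars.lowerChar x) by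
              simp [pvALoop, hAV, hv]]
        rw [ih1 _ hv]; simp
      · intro v hvv
        by_cases hvx : v = PySem.Chars.lowerChar x
        · subst hvx
          rw [show pvALoop (x :: rest) 1 (PySem.Chars.lowerChar x)
                = pvALoop rest 1 (PySem.Chars.lowerChar x) by
                simp [pvALoop, hAV, hv]]
          rw [ih1 _ hvv]
          simp only [List.map_cons, pairBad_cons, tripleBad_cons]
          simp [pairHead, hvv, Bool.or_assoc]
        · rw [show pvALoop (x :: rest) 1 v = false by
                simp [pvALoop, hAV, hv]; intro h; exact absurd h hvx]
          simp only [List.map_cons, pairBad_cons]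
          rw [pairHead_of_vowel_ne _ hvv hv hvx]
          simp
      · intro d
        rw [show pvALoop (x :: rest) (-1) d = pvALoop rest 1 (PySem.Chars.lowerChar x) by
              simp [pvALoop, hAV, hv]]
        rw [ih1 _ hv]
        simp only [List.map_cons, twoCons_cons]
        simp [hv]
      · intro d
        rw [show pvALoop (x :: rest) (-2) d = pvALoop rest 1 (PySem.Chars.lowerChar x) by
              simp [pvALoop, hAV, hv]]
        rw [ih1 _ hv]
        simp [headCons, hv]
    | false =>
      refine ⟨?_, ?_, ?_, ?_⟩
      · intro d
        rw [show pvALoop (x :: rest) 0 d = pvALoop rest (-1) d by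
              simp [pvALoop, hAV, hv]]
        rw [ihm1 d]
        simp only [List.map_cons, pairBad_cons, tripleBad_cons]
        rw [pairHead_false_left _ hv]
        simp [hv, Bool.or_comm, Bool.or_left_comm]
      · intro v hvv
        rw [show pvALoop (x :: rest) 1 v = pvALoop rest (-1) v by
              simp [pvALoop, hAV, hv]]
        rw [ihm1 v]
        simp only [List.map_cons, pairBad_cons, tripleBad_cons, twoCons_cons]
        rw [pairHead_false_left _ hv, pairHead_false_right _ hv]
        simp [hv, hvv, Bool.or_comm, Bool.or_left_comm]
      · intro d
        rw [show pvALoop (x :: rest) (-1) d = pvALoop rest (-2) d by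
              simp [pvALoop, hAV, hv]]
        rw [ihm2 d]
        simp only [List.map_cons, pairBad_cons, tripleBad_cons, twoCons_cons]
        rw [pairHead_false_left _ hv]
        cases h3 : headCons (rest.map PySem.Chars.lowerChar) with
        | false =>
          rw [twoCons_of_headCons_false h3]
          simp [hv]
        | true => simp [hv, h3, Bool.or_comm]
      · intro d
        rw [show pvALoop (x :: rest) (-2) d = false by
              simp [pvALoop, hAV, hv]]
        simp [headCons, hv]

-- per word: Source B's bad(word) is the disjunction of the two window checks …
lemma pvBBad_or (w : String) :
    pvBBad w = (pairBad ((PySem.Str.lower w).toList) || tripleBad ((PySem.Str.lower w).toList)) := by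
  have hdef : pvBBad w = if pairBad ((PySem.Str.lower w).toList) then true
      else tripleBad ((PySem.Str.lower w).toList) := rfl
  rw [hdef]
  cases h : pairBad ((PySem.Str.lower w).toList) <;> simp

-- … and hence the negation of A's inner loop
lemma pvBBad_eq (w : String) : pvBBad w = !pvALoop w.toList 0 ' ' := by
  have hl : (PySem.Str.lower w).toList = w.toList.map PySem.Chars.lowerChar := by
    simp [PySem.Str.lower, PySem.Chars.lower]
  rw [pvBBad_or, hl, (pvALoop_char w.toList).1 ' ']
  simp

lemma canPronounce_eq (words : List String) : canPronounce words = canPronounce_alt words := by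
  induction words with
  | nil => rfl
  | cons w ws ih =>
    rw [canPronounce, canPronounce_alt, List.find?]
    cases hb : pvBBad w with
    | true =>
      have : pvALoop w.toList 0 ' ' = false := by
        have := pvBBad_eq w; rw [hb] at this; simpa using this.symm
      simp [this]
    | false =>
      have : pvALoop w.toList 0 ' ' = true := by
        have := pvBBad_eq w; rw [hb] at this; simpa using this.symm
      simp [this, ih, canPronounce_alt]

-- ===== VERDICT (by name: the statement is the Claim_ definition above) =====
theorem canPronounce_spec : Claim_equal_canPronounce := by
  intro words _
  unfold Spec_canPronounce
  exact canPronounce_eq words
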